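-- pv_equiv track=rewrite | github.com/wujiay-cpu/AI_selection_Problem | backend/algorithm.py | _prune_redundant_multi
-- ===== SOURCE A (Python) =====
-- import itertools
--
-- def _prune_redundant_multi(final_result, sample_pool, k, all_targets, s, required_cover):
--     if not final_result:
--         return final_result
--
--     def build_cover_map_for(cand):
--         c_set = set(cand)
--         cover_map = {}
--         for idx, t in enumerate(all_targets):
--             inter = c_set.intersection(t)
--             if len(inter) >= s:
--                 cover_map[idx] = set(itertools.combinations(sorted(inter), s))
--         return cover_map
--
--     cover_maps = [build_cover_map_for(tuple(c)) for c in final_result]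
--
--     changed = True
--     while changed:
--         changed = False
--         m = len(final_result)
--         if m <= 1:
--             break
--         for i in range(m):
--             covered_without_i = [set() for _ in all_targets]
--             for j in range(m):
--                 if j == i:
--                     continue
--                 for idx, add_set in cover_maps[j].items():
--                     covered_without_i[idx].update(add_set)
--             still_ok = all(len(covered_without_i[idx]) >= required_cover for idx in range(len(all_targets)))
--             if still_ok:
--                 final_result.pop(i)
--                 cover_maps.pop(i)
--                 changed = True
--                 break
--
--     return final_result
-- ===== SOURCE B (Python) =====
-- import itertools
--
-- # Alternative implementation with a transposed data layout: instead of per-candidate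
-- # dicts target->combos, B keeps a per-target table rows[t][i] of candidate i's combo
-- # set (or None), builds one combo counter per target each round, and tests removal of
-- # candidate i via count==1 subtraction instead of re-unioning all other candidates.
-- # Like A, it prunes final_result in place and returns the same list object.
-- def _prune_redundant_multi(final_result, sample_pool, k, all_targets, s, required_cover):
--     if not final_result:
--         return final_result
--
--     def combos_for(t, cand):
--         inter = set(cand) & set(t)
--         if len(inter) >= s:
--             return set(itertools.combinations(sorted(inter), s))
--         return None
--
--     # rows[tidx][i] = combo set of candidate i for target tidx, or None
--     rows = [[combos_for(t, c) for c in final_result] for t in all_targets]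
--
--     fuel = len(final_result)
--     while fuel > 0 and len(final_result) > 1:
--         fuel -= 1
--         counters = []
--         for row in rows:
--             cnt = {}
--             for st in row:
--                 if st is not None:
--                     for combo in st:
--                         cnt[combo] = cnt.get(combo, 0) + 1
--             counters.append(cnt)
--         rem = next((i for i in range(len(final_result))
--                     if all(len(cnt) - sum(1 for combo in (row[i] or ()) if cnt[combo] == 1) >= required_cover
--                            for row, cnt in zip(rows, counters))),
--                    None)
--         if rem is None:
--             break
--         del final_result[rem]
--         for row in rows:
--             del row[rem]
--     return final_result
-- ===== Notes on version B (the rewrite author's own statement) =====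
-- stated objective: alternative
-- what changed: B transposes the data structure (a per-target table rows[t][i] of combo sets instead of A's per-candidate dicts), builds one combo counter per target per round, and tests a candidate's removability by subtracting its combos whose count is 1, instead of A's re-unioning of all other candidates' combo sets for every removal test; per round removal testing is O(m*combos) instead of O(m^2*combos), but on generated inputs total time is dominated by the shared combo construction, so no measured speedup.
import Mathlib
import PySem

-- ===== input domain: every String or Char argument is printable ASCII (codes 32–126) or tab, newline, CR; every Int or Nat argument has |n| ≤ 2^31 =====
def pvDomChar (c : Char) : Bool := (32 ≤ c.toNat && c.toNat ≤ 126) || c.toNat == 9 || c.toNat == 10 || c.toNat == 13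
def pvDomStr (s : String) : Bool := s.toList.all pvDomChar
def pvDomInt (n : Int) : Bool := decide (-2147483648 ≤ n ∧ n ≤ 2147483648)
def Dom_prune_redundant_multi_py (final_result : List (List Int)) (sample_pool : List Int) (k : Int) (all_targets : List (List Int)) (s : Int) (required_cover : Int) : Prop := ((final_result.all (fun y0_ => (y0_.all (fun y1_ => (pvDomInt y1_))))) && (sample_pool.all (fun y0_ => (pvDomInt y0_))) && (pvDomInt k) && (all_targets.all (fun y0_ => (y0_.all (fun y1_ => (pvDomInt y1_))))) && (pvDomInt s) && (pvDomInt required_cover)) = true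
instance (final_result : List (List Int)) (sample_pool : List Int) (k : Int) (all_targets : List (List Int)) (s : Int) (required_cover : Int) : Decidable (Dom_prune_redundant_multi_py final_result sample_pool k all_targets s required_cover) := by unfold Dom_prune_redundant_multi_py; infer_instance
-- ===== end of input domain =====

-- B transposes the data layout (a per-target table of combo sets instead of A's
-- per-candidate dicts) and tests removability of a candidate via one combo counter
-- per target (count==1 subtraction) instead of A's re-union over all other candidates.
-- Both Pythons prune final_result in place and return that same list object; the
-- equivalence proved here is about the returned value.

-- ===== PORT A =====
abbrev PvSet := PySem.Set (List Int)
abbrev PvCM := PySem.Dict Nat PvSet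

def pvBuildCoverMap (all_targets : List (List Int)) (s : Int) (cand : List Int) : PvCM :=
  (List.range all_targets.length).foldl (fun d idx =>
    let inter := PySem.Set.inter (PySem.Set.ofList cand) (all_targets.getD idx [])
    if s ≤ PySem.Set.len inter then
      d.insert idx (PySem.Set.ofList (PySem.List.combinations (PySem.List.sorted inter (fun x => x)) s.toNat))
    else d) PySem.Dict.empty

-- covered_without_i[idx].update(add_set), one (idx, add_set) item
def pvSetAt (a : List PvSet) (p : Nat × PvSet) : List PvSet :=
  a.set p.1 (PySem.Set.update (a.getD p.1 PySem.Set.empty) p.2)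

def pvStepA (acc : List PvSet) (cm : PvCM) : List PvSet :=
  cm.items.foldl pvSetAt acc

def pvCoveredWithout (cms : List PvCM) (m T i : Nat) : List PvSet :=
  (List.range m).foldl
    (fun acc j => if j = i then acc else pvStepA acc (cms.getD j PySem.Dict.empty))
    (List.replicate T PySem.Set.empty)

def pvStillOkA (cov : List PvSet) (T : Nat) (rc : Int) : Bool :=
  (List.range T).all fun idx => rc ≤ PySem.Set.len (cov.getD idx PySem.Set.empty)

def pvFindA (cms : List PvCM) (m T : Nat) (rc : Int) : Option Nat :=
  (List.range m).find? fun i => pvStillOkA (pvCoveredWithout cms m T i) T rc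

def pvLoopA (fr : List (List Int)) (cms : List PvCM) (T : Nat) (rc : Int) : List (List Int) :=
  if fr.length ≤ 1 then fr
  else
    match h : pvFindA cms fr.length T rc with
    | some i => pvLoopA (fr.eraseIdx i) (cms.eraseIdx i) T rc
    | none => fr
termination_by fr.length
decreasing_by
  have hi : i < fr.length := by
    simp only [pvFindA] at h
    have := List.mem_of_find?_eq_some h
    simpa [List.mem_range] using this
  simp [List.length_eraseIdx, hi]
  omega

def prune_redundant_multi_py (final_result : List (List Int)) (sample_pool : List Int) (k : Int) (all_targets : List (List Int)) (s : Int) (required_cover : Int) : List (List Int) :=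
  if final_result = [] then final_result
  else pvLoopA final_result (final_result.map (pvBuildCoverMap all_targets s)) all_targets.length required_cover

-- ===== PORT B =====
-- combos_for(t, cand): candidate's combo set for one target, or None
def pvCombosFor (s : Int) (t cand : List Int) : Option PvSet :=
  let inter := PySem.Set.inter (PySem.Set.ofList cand) (PySem.Set.ofList t)
  if s ≤ PySem.Set.len inter then
    some (PySem.Set.ofList (PySem.List.combinations (PySem.List.sorted inter (fun x => x)) s.toNat))
  else none

-- cnt[combo] = cnt.get(combo, 0) + 1 over the (non-None) sets of one row
def pvRowCounter (row : List (Option PvSet)) : PySem.Dict (List Int) Int :=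
  row.foldl (fun cnt st? =>
    match st? with
    | some st => st.foldl (fun cnt combo => cnt.modify combo 0 (· + 1)) cnt
    | none => cnt) PySem.Dict.empty

-- sum(1 for combo in (row[i] or ()) if cnt[combo] == 1)
def pvUniq (cnt : PySem.Dict (List Int) Int) (st : PvSet) : Int :=
  st.foldl (fun u combo => if cnt.getD combo 0 == 1 then u + 1 else u) 0

def pvOkB (rows : List (List (Option PvSet))) (counters : List (PySem.Dict (List Int) Int)) (i : Nat) (rc : Int) : Bool :=
  (rows.zip counters).all fun p =>
    rc ≤ (PySem.Dict.size p.2 : Int) - pvUniq p.2 ((p.1.getD i none).getD PySem.Set.empty)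

def pvFindB (rows : List (List (Option PvSet))) (m : Nat) (rc : Int) : Option Nat :=
  let counters := rows.map pvRowCounter
  (List.range m).find? fun i => pvOkB rows counters i rc

-- fuel = initial number of candidates bounds the number of removals
def pvLoopB : Nat → List (List Int) → List (List (Option PvSet)) → Int → List (List Int)
  | 0, fr, _, _ => fr
  | fuel + 1, fr, rows, rc =>
    if fr.length ≤ 1 then fr
    else
      match pvFindB rows fr.length rc with
      | some i => pvLoopB fuel (fr.eraseIdx i) (rows.map (fun row => row.eraseIdx i)) rc
      | none => fr

def prune_redundant_multi_py_alt (final_result : List (List Int)) (sample_pool : List Int) (k : Int) (all_targets : List (List Int)) (s : Int) (required_cover : Int) : List (List Int) :=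
  if final_result = [] then final_result
  else pvLoopB final_result.length final_result
    (all_targets.map (fun t => final_result.map (pvCombosFor s t))) required_cover

-- ===== PRECONDITION & SPEC =====
-- Pre_ excludes exactly the inputs where A raises: with a nonempty final_result and
-- nonempty all_targets, a negative s reaches itertools.combinations(..., s) which
-- raises ValueError (B's identical combo construction raises there too).
def Pre_prune_redundant_multi_py (final_result : List (List Int)) (sample_pool : List Int) (k : Int) (all_targets : List (List Int)) (s : Int) (required_cover : Int) : Prop :=
  final_result = [] ∨ all_targets = [] ∨ 0 ≤ s
instance (final_result : List (List Int)) (sample_pool : List Int) (k : Int) (all_targets : List (List Int)) (s : Int) (required_cover : Int) : Decidable (Pre_prune_redundant_multi_py final_result sample_pool k all_targets s required_cover) := by unfold Pre_prune_redundant_multi_py; infer_instance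

def pvWitness_prune_redundant_multi_py : List (List Int) × List Int × Int × List (List Int) × Int × Int :=
  ([[1], [1, 2]], [], 0, [[1, 2]], 1, 1)

def Spec_prune_redundant_multi_py (final_result : List (List Int)) (sample_pool : List Int) (k : Int) (all_targets : List (List Int)) (s : Int) (required_cover : Int) (out : List (List Int)) : Prop := out = prune_redundant_multi_py_alt final_result sample_pool k all_targets s required_cover
instance (final_result : List (List Int)) (sample_pool : List Int) (k : Int) (all_targets : List (List Int)) (s : Int) (required_cover : Int) (out : List (List Int)) : Decidable (Spec_prune_redundant_multi_py final_result sample_pool k all_targets s required_cover out) := by unfold Spec_prune_redundant_multi_py; infer_instance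

-- ===== CLAIM (what is proved, stated in full; the proofs are below) =====
def Claim_equal_prune_redundant_multi_py : Prop := ∀ (final_result : List (List Int)) (sample_pool : List Int) (k : Int) (all_targets : List (List Int)) (s : Int) (required_cover : Int), Dom_prune_redundant_multi_py final_result sample_pool k all_targets s required_cover → Pre_prune_redundant_multi_py final_result sample_pool k all_targets s required_cover → Spec_prune_redundant_multi_py final_result sample_pool k all_targets s required_cover (prune_redundant_multi_py final_result sample_pool k all_targets s required_cover)

-- ===== LEMMAS AND PROOFS =====

-- a well-formed cover map: unique keys, every looked-up set duplicate-free
def PvGood (cm : PvCM) : Prop :=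
  cm.keys.Nodup ∧ ∀ idx : Nat, (cm.getD idx PySem.Set.empty).Nodup

theorem pvBuildCoverMap_good (all_targets : List (List Int)) (s : Int) (cand : List Int) :
    PvGood (pvBuildCoverMap all_targets s cand) := by
  unfold pvBuildCoverMap
  generalize List.range all_targets.length = l
  have base : PvGood (PySem.Dict.empty : PvCM) := by
    constructor
    · simp [PySem.Dict.keys_empty]
    · intro idx; simp [PySem.Dict.getD_empty, PySem.Set.empty]
  generalize hd : (PySem.Dict.empty : PvCM) = d at base ⊢
  clear hd
  induction l generalizing d with
  | nil => exact base
  | cons j t ih =>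
    rw [List.foldl_cons]
    apply ih
    dsimp only
    split
    · refine ⟨PySem.Dict.nodup_keys_insert _ _ _ base.1, ?_⟩
      intro idx
      rw [PySem.Dict.getD_insert]
      split
      · exact PySem.Set.nodup_ofList _
      · exact base.2 idx
    · exact base

theorem pvFoldSetAt_length (l : List (Nat × PvSet)) (acc : List PvSet) :
    (l.foldl pvSetAt acc).length = acc.length := by
  induction l generalizing acc with
  | nil => rfl
  | cons p t ih => simp [List.foldl_cons, ih, pvSetAt, List.length_set]

theorem pvFoldSetAt_getD_of_not_mem (l : List (Nat × PvSet)) (acc : List PvSet) (idx : Nat)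
    (h : ∀ p ∈ l, p.1 ≠ idx) :
    (l.foldl pvSetAt acc).getD idx PySem.Set.empty = acc.getD idx PySem.Set.empty := by
  induction l generalizing acc with
  | nil => rfl
  | cons p t ih =>
    rw [List.foldl_cons, ih _ (fun q hq => h q (List.mem_cons_of_mem _ hq))]
    have hne : p.1 ≠ idx := h p (List.mem_cons_self ..)
    simp [pvSetAt, List.getD_eq_getElem?_getD, List.getElem?_set_ne hne]

theorem pvStepA_getD (cm : PvCM) (hk : cm.keys.Nodup) (acc : List PvSet) (idx : Nat)
    (hidx : idx < acc.length) :
    (pvStepA acc cm).getD idx PySem.Set.empty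
      = PySem.Set.update (acc.getD idx PySem.Set.empty) (cm.getD idx PySem.Set.empty) := by
  unfold pvStepA
  have hkeys : cm.keys = cm.items.map Prod.fst := rfl
  by_cases hmem : idx ∈ cm.keys
  · have h1 : cm.get? idx ≠ none := by
      rw [Ne, PySem.Dict.get?_eq_none_iff_not_mem_keys]; simpa using hmem
    obtain ⟨v, hv⟩ := Option.ne_none_iff_exists'.mp h1
    have hit : (idx, v) ∈ cm.items := PySem.Dict.mem_items_of_get?_eq_some _ hv
    have hgD : cm.getD idx PySem.Set.empty = v := PySem.Dict.getD_of_get?_eq_some _ _ hv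
    obtain ⟨l₁, l₂, hsplit⟩ := List.append_of_mem hit
    rw [hkeys, hsplit] at hk
    simp only [List.map_append, List.map_cons, List.nodup_append, List.nodup_cons] at hk
    have h₁ : ∀ p ∈ l₁, p.1 ≠ idx := by
      intro p hp he
      exact hk.2.2 p.1 (List.mem_map_of_mem hp) idx (List.mem_cons_self ..) he
    have h₂ : ∀ p ∈ l₂, p.1 ≠ idx := by
      intro p hp he
      exact hk.2.1.1 (he ▸ List.mem_map_of_mem (f := Prod.fst) hp)
    rw [hsplit, List.foldl_append, List.foldl_cons,
      pvFoldSetAt_getD_of_not_mem _ _ _ h₂]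
    have hlen1 : (List.foldl pvSetAt acc l₁).length = acc.length := pvFoldSetAt_length _ _
    have hacc1 : (List.foldl pvSetAt acc l₁).getD idx PySem.Set.empty
        = acc.getD idx PySem.Set.empty := pvFoldSetAt_getD_of_not_mem _ _ _ h₁
    simp only [pvSetAt, hacc1, hgD]
    rw [List.getD_eq_getElem _ _ (by simp [List.length_set, hlen1, hidx]),
      List.getElem_set_self]
  · have hni : ∀ p ∈ cm.items, p.1 ≠ idx := by
      intro p hp he
      exact hmem (hkeys ▸ (he ▸ List.mem_map_of_mem (f := Prod.fst) hp))
    rw [pvFoldSetAt_getD_of_not_mem _ _ _ hni]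
    have hc : cm.contains idx = false := by
      rcases h : cm.contains idx with _ | _
      · rfl
      · exact absurd ((PySem.Dict.contains_iff_mem_keys _ _).mp h) hmem
    rw [PySem.Dict.getD_of_not_contains _ _ hc, show (PySem.Set.empty : PvSet) = [] from rfl, PySem.Set.update_nil]

theorem pvStepA_length (cm : PvCM) (acc : List PvSet) :
    (pvStepA acc cm).length = acc.length := pvFoldSetAt_length _ _

theorem pvGetD_keys_nodup (cms : List PvCM) (hg : ∀ cm ∈ cms, PvGood cm) (j : Nat) :
    (cms.getD j PySem.Dict.empty).keys.Nodup := by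
  by_cases hj : j < cms.length
  · rw [List.getD_eq_getElem _ _ hj]
    exact (hg _ (List.getElem_mem hj)).1
  · rw [List.getD_eq_getElem?_getD, List.getElem?_eq_none (by omega)]
    simp [PySem.Dict.keys_empty]

theorem pvFoldJ_spec (cms : List PvCM) (hg : ∀ cm ∈ cms, PvGood cm) (idx : Nat) (J : List Nat) :
    ∀ acc : List PvSet, idx < acc.length →
    (J.foldl (fun acc j => pvStepA acc (cms.getD j PySem.Dict.empty)) acc).length = acc.length ∧
    ((acc.getD idx PySem.Set.empty).Nodup →
      ((J.foldl (fun acc j => pvStepA acc (cms.getD j PySem.Dict.empty)) acc).getD idx PySem.Set.empty).Nodup) ∧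
    ∀ x, (x ∈ (J.foldl (fun acc j => pvStepA acc (cms.getD j PySem.Dict.empty)) acc).getD idx PySem.Set.empty ↔
      x ∈ acc.getD idx PySem.Set.empty ∨ ∃ j ∈ J, x ∈ (cms.getD j PySem.Dict.empty).getD idx PySem.Set.empty) := by
  induction J with
  | nil => intro acc _; simp
  | cons j t ih =>
    intro acc hidx
    rw [List.foldl_cons]
    have hstep := pvStepA_getD (cms.getD j PySem.Dict.empty) (pvGetD_keys_nodup cms hg j) acc idx hidx
    have hlen := pvStepA_length (cms.getD j PySem.Dict.empty) acc
    obtain ⟨ihl, ihn, ihm⟩ := ih (pvStepA acc (cms.getD j PySem.Dict.empty)) (by omega)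
    refine ⟨by omega, ?_, ?_⟩
    · intro hnd
      apply ihn
      rw [hstep]
      exact PySem.Set.nodup_update _ _ hnd
    · intro x
      rw [ihm x, hstep, PySem.Set.mem_update]
      simp only [List.mem_cons]
      constructor
      · rintro ((h | h) | ⟨j', hj', h⟩)
        · exact Or.inl h
        · exact Or.inr ⟨j, Or.inl rfl, h⟩
        · exact Or.inr ⟨j', Or.inr hj', h⟩
      · rintro (h | ⟨j', (rfl | hj'), h⟩)
        · exact Or.inl (Or.inl h)
        · exact Or.inl (Or.inr h)
        · exact Or.inr ⟨j', hj', h⟩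

theorem pvCovered_spec (cms : List PvCM) (m T i idx : Nat) (hidx : idx < T)
    (hg : ∀ cm ∈ cms, PvGood cm) :
    ((pvCoveredWithout cms m T i).getD idx PySem.Set.empty).Nodup ∧
    ∀ x, (x ∈ (pvCoveredWithout cms m T i).getD idx PySem.Set.empty ↔
      ∃ j, j < m ∧ j ≠ i ∧ x ∈ (cms.getD j PySem.Dict.empty).getD idx PySem.Set.empty) := by
  have hfun : (fun (acc : List PvSet) j => if j = i then acc else pvStepA acc (cms.getD j PySem.Dict.empty))
      = fun acc j => if (fun j => !(j == i)) j = true then pvStepA acc (cms.getD j PySem.Dict.empty) else acc := by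
    funext acc j
    by_cases hj : j = i <;> simp [hj]
  unfold pvCoveredWithout
  rw [hfun, ← List.foldl_filter]
  obtain ⟨_, hn, hm⟩ := pvFoldJ_spec cms hg idx ((List.range m).filter (fun j => !(j == i)))
    (List.replicate T PySem.Set.empty) (by simpa using hidx)
  have hrep : (List.replicate T (PySem.Set.empty : PvSet)).getD idx PySem.Set.empty = PySem.Set.empty := by
    rw [List.getD_eq_getElem _ _ (by simpa using hidx), List.getElem_replicate]
  constructor
  · apply hn
    rw [hrep]
    exact List.nodup_nil
  · intro x
    rw [hm x, hrep]
    simp only [PySem.Set.empty, List.not_mem_nil, false_or, List.mem_filter, List.mem_range]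
    constructor
    · rintro ⟨j, ⟨hj, hne⟩, h⟩
      exact ⟨j, hj, by simpa using hne, h⟩
    · rintro ⟨j, hj, hne, h⟩
      exact ⟨j, ⟨hj, by simpa using hne⟩, h⟩

theorem pvCount_flatten (cms : List PvCM) (idx : Nat) (hg : ∀ cm ∈ cms, PvGood cm) (x : List Int) :
    ((cms.map (fun cm => cm.getD idx PySem.Set.empty)).flatten).count x
      = cms.countP (fun cm => decide (x ∈ cm.getD idx PySem.Set.empty)) := by
  induction cms with
  | nil => simp
  | cons c t ih =>
    simp only [List.map_cons, List.flatten_cons, List.count_append, List.countP_cons,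
      ih (fun cm hcm => hg cm (List.mem_cons_of_mem _ hcm))]
    by_cases hx : x ∈ c.getD idx PySem.Set.empty
    · rw [List.count_eq_one_of_mem ((hg c (List.mem_cons_self ..)).2 idx) hx]
      have hx' : x ∈ PySem.Dict.getD c idx [] := hx
      simp [hx']
      omega
    · rw [List.count_eq_zero_of_not_mem hx]
      have hx' : x ∉ PySem.Dict.getD c idx [] := hx
      simp [hx']

-- A-side removal test as counter size minus count-1 combos (shared combinatorial core)
theorem pvLen_eq (cms : List PvCM) (m T i idx : Nat) (hidx : idx < T) (him : i < m)
    (hm : m = cms.length) (hg : ∀ cm ∈ cms, PvGood cm) :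
    PySem.Set.len ((pvCoveredWithout cms m T i).getD idx PySem.Set.empty)
      = (PySem.Dict.size (PySem.Dict.counter ((cms.map (fun cm => cm.getD idx PySem.Set.empty)).flatten)) : Int)
        - (((cms.getD i PySem.Dict.empty).getD idx PySem.Set.empty).countP
            (fun combo => (PySem.Dict.counter ((cms.map (fun cm => cm.getD idx PySem.Set.empty)).flatten)).getD combo 0 == 1) : Int) := by
  subst hm
  have him' : i < cms.length := him
  set f : PvCM → PvSet := fun cm => cm.getD idx PySem.Set.empty with hf
  set L : List (List Int) := (cms.map f).flatten with hL
  obtain ⟨hnodA, hmemA⟩ := pvCovered_spec cms cms.length T i idx hidx hg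
  set covA := (pvCoveredWithout cms cms.length T i).getD idx PySem.Set.empty with hcov
  -- size of the counter = number of distinct combos
  have hsize : PySem.Dict.size (PySem.Dict.counter L) = (PySem.Set.ofList L).length := by
    have h1 : (PySem.Dict.counter L).keys.length = (PySem.Set.ofList L).length := by
      rw [PySem.Dict.keys_counter]
    simpa [PySem.Dict.size, PySem.Dict.keys, List.length_map] using h1
  -- the tested predicate is count = 1
  have hgetD : cms.getD i PySem.Dict.empty = cms[i] := List.getD_eq_getElem _ _ him'
  have hpred : (f cms[i]).countP (fun combo => (PySem.Dict.counter L).getD combo 0 == 1)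
      = (f cms[i]).countP (fun c => decide (L.count c = 1)) := by
    apply List.countP_congr
    intro a _
    rw [PySem.Dict.getD_counter]
    simp [beq_iff_eq, Nat.cast_eq_one]
  -- positional count characterisation
  have hq : ∀ x : List Int, L.count x = cms.countP (fun cm => decide (x ∈ f cm)) :=
    pvCount_flatten cms idx hg
  have hsplitL : cms.take i ++ cms[i] :: cms.drop (i + 1) = cms := by
    rw [List.getElem_cons_drop, List.take_append_drop]
  have hcnt : ∀ x : List Int, L.count x
      = (cms.take i).countP (fun cm => decide (x ∈ f cm))
        + ((if x ∈ f cms[i] then 1 else 0))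
        + (cms.drop (i + 1)).countP (fun cm => decide (x ∈ f cm)) := by
    intro x
    rw [hq x]
    conv_lhs => rw [← hsplitL]
    rw [List.countP_append, List.countP_cons]
    by_cases hx : x ∈ f cms[i] <;> simp [hx] <;> omega
  -- (a) a combo of candidate i also present elsewhere has count ≥ 2
  have hcount_two : ∀ x : List Int, x ∈ f cms[i] →
      (∃ j, ∃ hj : j < cms.length, j ≠ i ∧ x ∈ f cms[j]) → L.count x ≠ 1 := by
    rintro x hxi ⟨j, hj, hne, hxj⟩
    rw [hcnt x]
    rcases Nat.lt_or_ge j i with hji | hji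
    · have hmem : cms[j] ∈ cms.take i := by
        refine List.mem_iff_getElem.mpr ⟨j, by simp [List.length_take]; omega, ?_⟩
        exact List.getElem_take
      have : 0 < (cms.take i).countP (fun cm => decide (x ∈ f cm)) :=
        List.countP_pos_iff.mpr ⟨cms[j], hmem, by simpa using hxj⟩
      simp [hxi]; omega
    · have hji' : i < j := by omega
      have hmem : cms[j] ∈ cms.drop (i + 1) := by
        refine List.mem_iff_getElem.mpr ⟨j - (i + 1), by simp [List.length_drop]; omega, ?_⟩
        rw [List.getElem_drop]
        congr 1
        omega
      have : 0 < (cms.drop (i + 1)).countP (fun cm => decide (x ∈ f cm)) :=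
        List.countP_pos_iff.mpr ⟨cms[j], hmem, by simpa using hxj⟩
      simp [hxi]; omega
  -- (b) a combo only candidate i holds has count 1
  have hcount_one : ∀ x : List Int, x ∈ f cms[i] →
      (∀ j (hj : j < cms.length), j ≠ i → x ∉ f cms[j]) → L.count x = 1 := by
    intro x hxi honly
    rw [hcnt x]
    have h1 : (cms.take i).countP (fun cm => decide (x ∈ f cm)) = 0 := by
      rw [List.countP_eq_zero]
      intro a ha
      obtain ⟨j, hjlt, rfl⟩ := List.mem_iff_getElem.mp ha
      have hjl : j < cms.length := by simp [List.length_take] at hjlt; omega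
      rw [List.getElem_take]
      simpa using honly j hjl (by simp [List.length_take] at hjlt; omega)
    have h2 : (cms.drop (i + 1)).countP (fun cm => decide (x ∈ f cm)) = 0 := by
      rw [List.countP_eq_zero]
      intro a ha
      obtain ⟨j, hjlt, rfl⟩ := List.mem_iff_getElem.mp ha
      rw [List.getElem_drop]
      have hjl : i + 1 + j < cms.length := by simp [List.length_drop] at hjlt; omega
      simpa using honly (i + 1 + j) hjl (by omega)
    simp [h1, h2, hxi]
  -- Finset bookkeeping
  classical
  set U : Finset (List Int) := (PySem.Set.ofList L).toFinset with hU
  set W : Finset (List Int) := ((f cms[i]).filter (fun c => decide (L.count c = 1))).toFinset with hW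
  set V : Finset (List Int) := covA.toFinset with hV
  have hfi_nodup : (f cms[i]).Nodup := (hg cms[i] (List.getElem_mem him')).2 idx
  rw [hgetD]
  have hfiEq : cms[i].getD idx PySem.Set.empty = f cms[i] := rfl
  rw [hfiEq, hpred, hsize]
  have hmemU : ∀ x : List Int, x ∈ U ↔ ∃ j, ∃ hj : j < cms.length, x ∈ f cms[j] := by
    intro x
    rw [hU, List.mem_toFinset, PySem.Set.mem_ofList, hL, List.mem_flatten]
    constructor
    · rintro ⟨l, hl, hx⟩
      obtain ⟨cm, hcm, rfl⟩ := List.mem_map.mp hl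
      obtain ⟨j, hj, rfl⟩ := List.mem_iff_getElem.mp hcm
      exact ⟨j, hj, hx⟩
    · rintro ⟨j, hj, hx⟩
      exact ⟨f cms[j], List.mem_map.mpr ⟨cms[j], List.getElem_mem hj, rfl⟩, hx⟩
  have hmemW : ∀ x : List Int, x ∈ W ↔ x ∈ f cms[i] ∧ L.count x = 1 := by
    intro x
    rw [hW, List.mem_toFinset, List.mem_filter]
    simp
  have hmemV : ∀ x : List Int, x ∈ V ↔ ∃ j, ∃ hj : j < cms.length, j ≠ i ∧ x ∈ f cms[j] := by
    intro x
    rw [hV, List.mem_toFinset, hmemA x]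
    constructor
    · rintro ⟨j, hj, hne, hx⟩
      refine ⟨j, hj, hne, ?_⟩
      rwa [List.getD_eq_getElem _ _ hj] at hx
    · rintro ⟨j, hj, hne, hx⟩
      refine ⟨j, hj, hne, ?_⟩
      rwa [List.getD_eq_getElem _ _ hj]
  have hWU : W ⊆ U := by
    intro x hx
    obtain ⟨hxi, _⟩ := (hmemW x).mp hx
    exact (hmemU x).mpr ⟨i, him', hxi⟩
  have hVUW : V = U \ W := by
    apply Finset.ext
    intro x
    rw [Finset.mem_sdiff, hmemV x, hmemU x, hmemW x]
    constructor
    · rintro ⟨j, hj, hne, hx⟩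
      refine ⟨⟨j, hj, hx⟩, ?_⟩
      rintro ⟨hxi, hc1⟩
      exact hcount_two x hxi ⟨j, hj, hne, hx⟩ hc1
    · rintro ⟨⟨j, hj, hx⟩, hnw⟩
      by_cases hji : j = i
      · subst hji
        by_contra hno
        push Not at hno
        refine hnw ⟨hx, hcount_one x hx ?_⟩
        intro j' hj' hne' hx'
        exact absurd hx' (by simpa [hne'] using hno j' hj')
      · exact ⟨j, hj, hji, hx⟩
  have hVcard : covA.length = V.card := (List.toFinset_card_of_nodup hnodA).symm
  have hUcard : (PySem.Set.ofList L).length = U.card :=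
    (List.toFinset_card_of_nodup (PySem.Set.nodup_ofList L)).symm
  have hWcard : (f cms[i]).countP (fun c => decide (L.count c = 1)) = W.card := by
    rw [List.countP_eq_length_filter, hW, List.toFinset_card_of_nodup (hfi_nodup.filter _)]
  have hcards : V.card = U.card - W.card := by
    rw [hVUW, Finset.card_sdiff, Finset.inter_eq_left.mpr hWU]
  have hle : W.card ≤ U.card := Finset.card_le_card hWU
  simp only [PySem.Set.len]
  rw [hVcard, hUcard, hWcard]
  omega

-- ===== B-side bridges =====

-- set(cand) & set(t) = c_set.intersection(t)
theorem pvInter_ofList (a t : List Int) :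
    PySem.Set.inter a (PySem.Set.ofList t) = PySem.Set.inter a t := by
  unfold PySem.Set.inter
  apply List.filter_congr
  intro x _
  rw [Bool.eq_iff_iff, PySem.Set.contains_iff, PySem.Set.contains_iff, PySem.Set.mem_ofList]

-- what pvBuildCoverMap's dict answers at key idx, in terms of pvCombosFor
theorem pvBuild_getD (all_targets : List (List Int)) (s : Int) (cand : List Int)
    (idx : Nat) : ∀ n : Nat, n ≤ all_targets.length →
    ((List.range n).foldl (fun d idx =>
        let inter := PySem.Set.inter (PySem.Set.ofList cand) (all_targets.getD idx [])
        if s ≤ PySem.Set.len inter then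
          d.insert idx (PySem.Set.ofList (PySem.List.combinations (PySem.List.sorted inter (fun x => x)) s.toNat))
        else d) (PySem.Dict.empty : PvCM)).getD idx PySem.Set.empty
      = if idx < n then (pvCombosFor s (all_targets.getD idx []) cand).getD PySem.Set.empty
        else PySem.Set.empty := by
  intro n
  induction n with
  | zero => intro _; simp [PySem.Dict.getD_empty]
  | succ n ih =>
    intro hn
    rw [List.range_succ, List.foldl_append, List.foldl_cons, List.foldl_nil]
    dsimp only
    split
    · rename_i hc
      rw [PySem.Dict.getD_insert]
      by_cases hin : idx = n
      · subst hin
        rw [if_pos (Nat.lt_succ_self _)]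
        unfold pvCombosFor
        rw [pvInter_ofList]
        simp only [PySem.Set.len, List.getD_eq_getElem?_getD] at hc
        simp [hc]
      · rw [if_neg hin, ih (by omega)]
        by_cases hlt : idx < n
        · rw [if_pos hlt, if_pos (by omega)]
        · rw [if_neg hlt, if_neg (by omega)]
    · rename_i hc
      rw [ih (by omega)]
      by_cases hin : idx = n
      · subst hin
        rw [if_neg (by omega), if_pos (Nat.lt_succ_self _)]
        unfold pvCombosFor
        rw [pvInter_ofList]
        simp only [PySem.Set.len, List.getD_eq_getElem?_getD] at hc
        simp [hc]
      · by_cases hlt : idx < n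
        · rw [if_pos hlt, if_pos (by omega)]
        · rw [if_neg hlt, if_neg (by omega)]

theorem pvBuildCoverMap_getD (all_targets : List (List Int)) (s : Int) (cand : List Int)
    (idx : Nat) (hidx : idx < all_targets.length) :
    (pvBuildCoverMap all_targets s cand).getD idx PySem.Set.empty
      = (pvCombosFor s (all_targets.getD idx []) cand).getD PySem.Set.empty := by
  unfold pvBuildCoverMap
  rw [pvBuild_getD all_targets s cand idx all_targets.length le_rfl, if_pos hidx]

-- the row counter is the Counter of all (non-None) combos of the row
theorem pvRowCounter_eq (row : List (Option PvSet)) :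
    pvRowCounter row
      = PySem.Dict.counter ((row.map (fun o => o.getD PySem.Set.empty)).flatten) := by
  unfold pvRowCounter
  rw [PySem.Dict.counter_eq_foldl, List.foldl_flatten, List.foldl_map]
  congr 1
  funext cnt o
  cases o <;> rfl

theorem pvUniq_eq_countP (cnt : PySem.Dict (List Int) Int) (st : PvSet) :
    pvUniq cnt st = (st.countP (fun combo => cnt.getD combo 0 == 1) : Int) := by
  unfold pvUniq
  suffices H : ∀ (l : List (List Int)) (a : Int),
      l.foldl (fun u combo => if cnt.getD combo 0 == 1 then u + 1 else u) a
        = a + (l.countP (fun combo => cnt.getD combo 0 == 1) : Int) by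
    simpa using H st 0
  intro l
  induction l with
  | nil => intro a; simp
  | cons c t ih =>
    intro a
    rw [List.foldl_cons, ih, List.countP_cons]
    split <;> rename_i hc <;> simp [hc] <;> push_cast <;> ring

-- Bool all over a list as all over its index range
theorem pvAll_eq_range {α : Type} (l : List α) (d : α) (q : α → Bool) :
    l.all q = (List.range l.length).all (fun i => q (l.getD i d)) := by
  rw [Bool.eq_iff_iff, List.all_eq_true, List.all_eq_true]
  constructor
  · intro h i hi
    have hi' : i < l.length := List.mem_range.mp hi
    rw [List.getD_eq_getElem _ _ hi']
    exact h _ (List.getElem_mem hi')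
  · intro h x hx
    obtain ⟨i, hi, rfl⟩ := List.mem_iff_getElem.mp hx
    have := h i (List.mem_range.mpr hi)
    rwa [List.getD_eq_getElem _ _ hi] at this

theorem pvZip_map_self {α β : Type} (l : List α) (f : α → β) :
    l.zip (l.map f) = l.map (fun a => (a, f a)) := by
  induction l with
  | nil => rfl
  | cons a t ih => simp [List.zip_cons_cons, ih]

-- the invariant linking A's per-candidate cover maps to B's per-target table
def PvRel (cms : List PvCM) (rows : List (List (Option PvSet))) (T : Nat) : Prop :=
  rows.length = T ∧ ∀ idx, idx < T →
    (rows.getD idx []).map (fun o => o.getD PySem.Set.empty)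
      = cms.map (fun cm => PySem.Dict.getD cm idx PySem.Set.empty)

theorem pvFind?_congr {α : Type} (l : List α) (p q : α → Bool) (h : ∀ a ∈ l, p a = q a) :
    l.find? p = l.find? q := by
  induction l with
  | nil => rfl
  | cons a t ih =>
    rw [List.find?_cons, List.find?_cons, h a (List.mem_cons_self ..),
      ih (fun b hb => h b (List.mem_cons_of_mem _ hb))]

theorem pvAll_congr {α : Type} (l : List α) (p q : α → Bool) (h : ∀ a ∈ l, p a = q a) :
    l.all p = l.all q := by
  induction l with
  | nil => rfl
  | cons a t ih =>
    rw [List.all_cons, List.all_cons, h a (List.mem_cons_self ..),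
      ih (fun b hb => h b (List.mem_cons_of_mem _ hb))]

theorem pvOkB_eq (cms : List PvCM) (rows : List (List (Option PvSet))) (T : Nat)
    (rc : Int) (i : Nat) (him : i < cms.length)
    (hrel : PvRel cms rows T) (hg : ∀ cm ∈ cms, PvGood cm) :
    pvStillOkA (pvCoveredWithout cms cms.length T i) T rc
      = pvOkB rows (rows.map pvRowCounter) i rc := by
  obtain ⟨hlen, hrow⟩ := hrel
  unfold pvStillOkA pvOkB
  rw [pvZip_map_self, List.all_map, pvAll_eq_range rows [], hlen]
  apply pvAll_congr
  intro idx hidx'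
  have hidx : idx < T := List.mem_range.mp hidx'
  simp only [Function.comp]
  have hmap := hrow idx hidx
  have hrowlen : (rows.getD idx []).length = cms.length := by
    have := congrArg List.length hmap
    simpa using this
  have hi_row : i < (rows.getD idx []).length := by omega
  have hst : ((rows.getD idx []).getD i none).getD PySem.Set.empty
      = (cms.getD i PySem.Dict.empty).getD idx PySem.Set.empty := by
    have h1 : ((rows.getD idx []).map (fun o => o.getD PySem.Set.empty))[i]?
        = (cms.map (fun cm => PySem.Dict.getD cm idx PySem.Set.empty))[i]? := by rw [hmap]
    rw [List.getElem?_map, List.getElem?_map, List.getElem?_eq_getElem hi_row,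
      List.getElem?_eq_getElem him, Option.map_some, Option.map_some] at h1
    rw [List.getD_eq_getElem _ _ hi_row, List.getD_eq_getElem _ _ him]
    exact Option.some.inj h1
  have hcnt : pvRowCounter (rows.getD idx [])
      = PySem.Dict.counter ((cms.map (fun cm => PySem.Dict.getD cm idx PySem.Set.empty)).flatten) := by
    rw [pvRowCounter_eq, hmap]
  rw [decide_eq_decide, pvUniq_eq_countP, hst, hcnt,
    pvLen_eq cms cms.length T i idx hidx him rfl hg]

theorem pvFindAB (cms : List PvCM) (rows : List (List (Option PvSet))) (T : Nat)
    (m : Nat) (rc : Int) (hm : m = cms.length)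
    (hrel : PvRel cms rows T) (hg : ∀ cm ∈ cms, PvGood cm) :
    pvFindA cms m T rc = pvFindB rows m rc := by
  subst hm
  unfold pvFindA pvFindB
  apply pvFind?_congr
  intro i hi
  exact pvOkB_eq cms rows T rc i (List.mem_range.mp hi) hrel hg

theorem pvLoop_eq (fuel : Nat) :
    ∀ (fr : List (List Int)) (cms : List PvCM) (rows : List (List (Option PvSet)))
      (T : Nat) (rc : Int), fuel = fr.length → cms.length = fr.length →
      PvRel cms rows T → (∀ cm ∈ cms, PvGood cm) →
      pvLoopA fr cms T rc = pvLoopB fuel fr rows rc := by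
  induction fuel with
  | zero =>
    intro fr cms rows T rc hfuel hm hrel hg
    show pvLoopA fr cms T rc = fr
    rw [pvLoopA.eq_def, if_pos (by omega)]
  | succ fuel ih =>
    intro fr cms rows T rc hfuel hm hrel hg
    rw [pvLoopA.eq_def]
    show _ = pvLoopB (fuel + 1) fr rows rc
    simp only [pvLoopB]
    by_cases h1 : fr.length ≤ 1
    · simp only [if_pos h1]
    · simp only [if_neg h1]
      have hfind := pvFindAB cms rows T fr.length rc hm.symm hrel hg
      rcases hB : pvFindB rows fr.length rc with _ | i
      · rw [hfind, hB]
      · rw [hfind, hB]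
        have hi : i < fr.length := by
          simp only [pvFindB] at hB
          have := List.mem_of_find?_eq_some hB
          simpa [List.mem_range] using this
        apply ih
        · simp [List.length_eraseIdx, hi]
          omega
        · simp [List.length_eraseIdx, hi, hm]
        · refine ⟨by simp [hrel.1], ?_⟩
          intro idx hidx
          have hmap := hrel.2 idx hidx
          have hidx' : idx < rows.length := by rw [hrel.1]; exact hidx
          have hgetmap : (rows.map (fun row => row.eraseIdx i)).getD idx []
              = (rows.getD idx []).eraseIdx i := by
            rw [List.getD_eq_getElem _ _ (by simpa using hidx'), List.getElem_map,
              List.getD_eq_getElem _ _ hidx']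
          rw [hgetmap, ← List.eraseIdx_map, hmap, List.eraseIdx_map]
        · exact fun cm hcm => hg cm (List.mem_of_mem_eraseIdx hcm)

-- ===== VERDICT (by name: the statement is the Claim_ definition above) =====
theorem prune_redundant_multi_py_spec : Claim_equal_prune_redundant_multi_py := by
  intro fr sp k at_ s rc _ _
  unfold Spec_prune_redundant_multi_py prune_redundant_multi_py prune_redundant_multi_py_alt
  by_cases hfr : fr = []
  · simp [hfr]
  · simp only [hfr, if_false]
    refine pvLoop_eq fr.length fr _ _ _ _ rfl (by simp) ?_ (by
      intro cm hcm
      obtain ⟨c, _, rfl⟩ := List.mem_map.mp hcm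
      exact pvBuildCoverMap_good _ _ _)
    constructor
    · simp
    · intro idx hidx
      rw [List.getD_eq_getElem _ _ (by simpa using hidx), List.getElem_map,
        List.map_map, List.map_map]
      apply List.map_congr_left
      intro c _
      simp only [Function.comp]
      rw [pvBuildCoverMap_getD at_ s c idx hidx, List.getD_eq_getElem _ _ hidx]
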